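-- pv_equiv track=rewrite | github.com/shadreza/voicenest-serverless | lambdas/voicenest_serverless/handler.py | find_best_voice_match
-- ===== SOURCE A (Python) =====
-- SUPPORTED_POLLY_LANGS = {
--     "arb": "Zeina", "ar-AE": "Hala", "nl-BE": "Lisa", "ca-ES": "Arlet",
--     "cs-CZ": "Jitka", "yue-CN": "Hiujin", "cmn-CN": "Zhiyu", "da-DK": "Sofie",
--     "nl-NL": "Lotte", "en-AU": "Olivia", "en-GB": "Amy", "en-IN": "Kajal",
--     "en-IE": "Niamh", "en-NZ": "Aria", "en-SG": "Jasmine", "en-ZA": "Ayanda",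
--     "en-US": "Joanna", "en-GB-WLS": "Geraint", "fi-FI": "Suvi", "fr-FR": "Lea",
--     "fr-BE": "Isabelle", "fr-CA": "Gabrielle", "de-DE": "Vicki", "de-AT": "Hannah",
--     "de-CH": "Sabrina", "hi-IN": "Kajal", "is-IS": "Dora", "it-IT": "Bianca",
--     "ja-JP": "Mizuki", "ko-KR": "Seoyeon", "nb-NO": "Ida", "pl-PL": "Maja",
--     "pt-BR": "Vitoria", "pt-PT": "Ines", "ro-RO": "Carmen", "ru-RU": "Tatyana",
--     "es-ES": "Lucia", "es-MX": "Mia", "es-US": "Lupe", "sv-SE": "Elin",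
--     "tr-TR": "Burcu", "cy-GB": "Gwyneth"
-- }
--
-- def find_best_voice_match(lang_code):
--     """
--     Attempt to find the best Polly voice match for the detected language code.
--     Matching order:
--     1. Exact match (e.g., 'hi-IN')
--     2. Prefix match (e.g., detected 'hi' matches 'hi-IN')
--     3. Loose containment match (e.g., detected 'hi' contained in 'hi-IN')
--     """
--     # Exact match
--     if lang_code in SUPPORTED_POLLY_LANGS:
--         return SUPPORTED_POLLY_LANGS[lang_code], lang_code
--
--     # Try prefix match for codes like 'hi' to 'hi-IN'
--     for full_code, voice_id in SUPPORTED_POLLY_LANGS.items():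
--         if full_code.startswith(lang_code + "-"):
--             return voice_id, full_code
--
--     # Loose containment match anywhere in the string (for cases like 'hi' in 'hi-IN')
--     for full_code, voice_id in SUPPORTED_POLLY_LANGS.items():
--         if lang_code in full_code:
--             return voice_id, full_code
--
--     # No match found
--     return None, None
-- ===== SOURCE B (Python) =====
-- SUPPORTED_POLLY_LANGS = {
--     "arb": "Zeina", "ar-AE": "Hala", "nl-BE": "Lisa", "ca-ES": "Arlet",
--     "cs-CZ": "Jitka", "yue-CN": "Hiujin", "cmn-CN": "Zhiyu", "da-DK": "Sofie",
--     "nl-NL": "Lotte", "en-AU": "Olivia", "en-GB": "Amy", "en-IN": "Kajal",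
--     "en-IE": "Niamh", "en-NZ": "Aria", "en-SG": "Jasmine", "en-ZA": "Ayanda",
--     "en-US": "Joanna", "en-GB-WLS": "Geraint", "fi-FI": "Suvi", "fr-FR": "Lea",
--     "fr-BE": "Isabelle", "fr-CA": "Gabrielle", "de-DE": "Vicki", "de-AT": "Hannah",
--     "de-CH": "Sabrina", "hi-IN": "Kajal", "is-IS": "Dora", "it-IT": "Bianca",
--     "ja-JP": "Mizuki", "ko-KR": "Seoyeon", "nb-NO": "Ida", "pl-PL": "Maja",
--     "pt-BR": "Vitoria", "pt-PT": "Ines", "ro-RO": "Carmen", "ru-RU": "Tatyana",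
--     "es-ES": "Lucia", "es-MX": "Mia", "es-US": "Lupe", "sv-SE": "Elin",
--     "tr-TR": "Burcu", "cy-GB": "Gwyneth"
-- }
--
-- def find_best_voice_match(lang_code):
--     voice = SUPPORTED_POLLY_LANGS.get(lang_code)
--     if voice is not None:
--         return voice, lang_code
--     prefix_hit = None
--     contain_hit = None
--     prefix = lang_code + "-"
--     for full_code, voice_id in SUPPORTED_POLLY_LANGS.items():
--         if prefix_hit is None and full_code.startswith(prefix):
--             prefix_hit = (voice_id, full_code)
--         if contain_hit is None and lang_code in full_code:
--             contain_hit = (voice_id, full_code)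
--     if prefix_hit is not None:
--         return prefix_hit
--     if contain_hit is not None:
--         return contain_hit
--     return None, None
-- ===== Notes on version B (the rewrite author's own statement) =====
-- stated objective: alternative
-- what changed: A's two sequential scans of SUPPORTED_POLLY_LANGS (prefix scan, then containment scan) are merged into one single pass that tracks the first prefix hit and the first containment hit, decided after the loop.
import Mathlib
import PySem

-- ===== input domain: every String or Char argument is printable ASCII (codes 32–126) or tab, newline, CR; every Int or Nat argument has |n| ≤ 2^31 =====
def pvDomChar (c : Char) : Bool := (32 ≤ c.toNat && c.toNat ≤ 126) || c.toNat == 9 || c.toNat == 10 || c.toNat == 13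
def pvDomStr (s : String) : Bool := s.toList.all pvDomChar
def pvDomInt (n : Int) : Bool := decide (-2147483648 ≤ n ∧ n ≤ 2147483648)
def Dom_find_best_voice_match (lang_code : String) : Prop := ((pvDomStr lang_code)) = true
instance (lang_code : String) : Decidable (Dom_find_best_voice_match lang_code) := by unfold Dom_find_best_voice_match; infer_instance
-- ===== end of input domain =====

-- B merges A's two sequential scans over SUPPORTED_POLLY_LANGS into one pass that
-- tracks the first prefix hit and the first containment hit (objective: simpler/alternative).

-- The module constant SUPPORTED_POLLY_LANGS, as its ordered item list.
def pollyLangs : List (String × String) := [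
  ("arb", "Zeina"),
  ("ar-AE", "Hala"),
  ("nl-BE", "Lisa"),
  ("ca-ES", "Arlet"),
  ("cs-CZ", "Jitka"),
  ("yue-CN", "Hiujin"),
  ("cmn-CN", "Zhiyu"),
  ("da-DK", "Sofie"),
  ("nl-NL", "Lotte"),
  ("en-AU", "Olivia"),
  ("en-GB", "Amy"),
  ("en-IN", "Kajal"),
  ("en-IE", "Niamh"),
  ("en-NZ", "Aria"),
  ("en-SG", "Jasmine"),
  ("en-ZA", "Ayanda"),
  ("en-US", "Joanna"),
  ("en-GB-WLS", "Geraint"),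
  ("fi-FI", "Suvi"),
  ("fr-FR", "Lea"),
  ("fr-BE", "Isabelle"),
  ("fr-CA", "Gabrielle"),
  ("de-DE", "Vicki"),
  ("de-AT", "Hannah"),
  ("de-CH", "Sabrina"),
  ("hi-IN", "Kajal"),
  ("is-IS", "Dora"),
  ("it-IT", "Bianca"),
  ("ja-JP", "Mizuki"),
  ("ko-KR", "Seoyeon"),
  ("nb-NO", "Ida"),
  ("pl-PL", "Maja"),
  ("pt-BR", "Vitoria"),
  ("pt-PT", "Ines"),
  ("ro-RO", "Carmen"),
  ("ru-RU", "Tatyana"),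
  ("es-ES", "Lucia"),
  ("es-MX", "Mia"),
  ("es-US", "Lupe"),
  ("sv-SE", "Elin"),
  ("tr-TR", "Burcu"),
  ("cy-GB", "Gwyneth")]

-- ===== PORT A =====
-- A's first loop: return the first (voice_id, full_code) with full_code.startswith(lang_code + "-").
def pvPrefixLoop (lang_code : String) : List (String × String) → Option (String × String)
  | [] => none
  | (full_code, voice_id) :: rest =>
    if PySem.Str.startswith full_code (lang_code ++ "-") then some (voice_id, full_code)
    else pvPrefixLoop lang_code rest

-- A's second loop: return the first (voice_id, full_code) with lang_code in full_code.
def pvContainLoop (lang_code : String) : List (String × String) → Option (String × String)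
  | [] => none
  | (full_code, voice_id) :: rest =>
    if PySem.Str.isIn lang_code full_code then some (voice_id, full_code)
    else pvContainLoop lang_code rest

def find_best_voice_match (lang_code : String) : Option String × Option String :=
  match (PySem.Dict.mk pollyLangs).get? lang_code with
  | some v => (some v, some lang_code)
  | none =>
    match pvPrefixLoop lang_code pollyLangs with
    | some (v, fc) => (some v, some fc)
    | none =>
      match pvContainLoop lang_code pollyLangs with
      | some (v, fc) => (some v, some fc)
      | none => (none, none)

-- ===== PORT B =====
-- B's single pass: keep the first prefix hit and the first containment hit in one fold.
def pvScanStep (lang_code : String)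
    (acc : Option (String × String) × Option (String × String))
    (item : String × String) : Option (String × String) × Option (String × String) :=
  let p := if acc.1.isNone && PySem.Str.startswith item.1 (lang_code ++ "-")
           then some (item.2, item.1) else acc.1
  let c := if acc.2.isNone && PySem.Str.isIn lang_code item.1
           then some (item.2, item.1) else acc.2
  (p, c)

def find_best_voice_match_alt (lang_code : String) : Option String × Option String :=
  match (PySem.Dict.mk pollyLangs).get? lang_code with
  | some v => (some v, some lang_code)
  | none =>
    match pollyLangs.foldl (pvScanStep lang_code) (none, none) with
    | (some (v, fc), _) => (some v, some fc)
    | (none, some (v, fc)) => (some v, some fc)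
    | (none, none) => (none, none)

-- ===== PRECONDITION & SPEC =====
def Spec_find_best_voice_match (lang_code : String) (out : Option String × Option String) : Prop := out = find_best_voice_match_alt lang_code
instance (lang_code : String) (out : Option String × Option String) : Decidable (Spec_find_best_voice_match lang_code out) := by unfold Spec_find_best_voice_match; infer_instance

-- ===== CLAIM (what is proved, stated in full; the proofs are below) =====
def Claim_equal_find_best_voice_match : Prop := ∀ (lang_code : String), Dom_find_best_voice_match lang_code → Spec_find_best_voice_match lang_code (find_best_voice_match lang_code)

-- ===== LEMMAS AND PROOFS =====
-- The single pass computes exactly (first prefix hit, first containment hit).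
theorem pvScan_eq (lang_code : String) (l : List (String × String))
    (p c : Option (String × String)) :
    l.foldl (pvScanStep lang_code) (p, c)
      = (p.or (pvPrefixLoop lang_code l), c.or (pvContainLoop lang_code l)) := by
  induction l generalizing p c with
  | nil => simp [pvPrefixLoop, pvContainLoop]
  | cons hd tl ih =>
    obtain ⟨fc, v⟩ := hd
    simp only [List.foldl_cons, pvScanStep, pvPrefixLoop, pvContainLoop]
    cases p <;> cases c <;>
      simp only [Option.isNone_some, Option.isNone_none, Bool.false_and, Bool.true_and,
        Option.or] <;>
      split_ifs <;> first | exact (False.elim ‹False›) | simp [ih, Option.or]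

theorem find_best_voice_match_spec : Claim_equal_find_best_voice_match := by
  intro lang_code _
  unfold Spec_find_best_voice_match find_best_voice_match find_best_voice_match_alt
  rw [pvScan_eq]
  cases (PySem.Dict.mk pollyLangs).get? lang_code with
  | some v => rfl
  | none =>
    cases h1 : pvPrefixLoop lang_code pollyLangs with
    | some pr => obtain ⟨v, fc⟩ := pr; simp [Option.or]
    | none =>
      cases h2 : pvContainLoop lang_code pollyLangs with
      | some pr => obtain ⟨v, fc⟩ := pr; simp [Option.or]
      | none => simp [Option.or]
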